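-- pv_equiv track=rewrite | github.com/boorooksus/Algorithm-Book | 백준/CH14-Backtracking/G4-2661-Good_Sequence2.py | dfs
-- ===== SOURCE A (Python) =====
-- from typing import List
--
-- def dfs(seq: List[int], idx: int, n: int) -> str:
--     for i in range(1, idx // 2 + 1):
--         if seq[-2 * i:-i] == seq[-i:]:
--             return ''
--
--     if idx == n:
--         return ''.join(map(str, seq))
--
--     for i in range(1, 4):
--         res = dfs(seq + [i], idx + 1, n)
--         if res:
--             return res
-- ===== SOURCE B (Python) =====
-- def dfs(seq, idx, n):
--     # Iterative DFS with an explicit stack of pending (sequence, counter) nodes,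
--     # replacing A's recursion; children pushed 3,2,1 so 1 is explored first.
--     stack = [(seq, idx)]
--     while stack:
--         s, i = stack.pop()
--         if any(s[-2 * j:-j] == s[-j:] for j in range(1, i // 2 + 1)):
--             continue
--         if i == n:
--             return ''.join(map(str, s))
--         stack.append((s + [3], i + 1))
--         stack.append((s + [2], i + 1))
--         stack.append((s + [1], i + 1))
--     return ''
-- ===== Notes on version B (the rewrite author's own statement) =====
-- stated objective: alternative
-- what changed: A's recursive depth-first backtracking is rewritten as an iterative while-loop over an explicit stack of pending (sequence, counter) nodes, pushed 3,2,1 so candidate 1 is explored first and the same first completed sequence is returned.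
-- outside the precondition, e.g. on dfs([1, 2, 1, 3, 1, 2, 1], 7, 8): A returns None, B returns ''; on dfs([1, 2, 1, 3, 1, 2, 1], 7, 0): A returns None, B returns ''
import Mathlib
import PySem

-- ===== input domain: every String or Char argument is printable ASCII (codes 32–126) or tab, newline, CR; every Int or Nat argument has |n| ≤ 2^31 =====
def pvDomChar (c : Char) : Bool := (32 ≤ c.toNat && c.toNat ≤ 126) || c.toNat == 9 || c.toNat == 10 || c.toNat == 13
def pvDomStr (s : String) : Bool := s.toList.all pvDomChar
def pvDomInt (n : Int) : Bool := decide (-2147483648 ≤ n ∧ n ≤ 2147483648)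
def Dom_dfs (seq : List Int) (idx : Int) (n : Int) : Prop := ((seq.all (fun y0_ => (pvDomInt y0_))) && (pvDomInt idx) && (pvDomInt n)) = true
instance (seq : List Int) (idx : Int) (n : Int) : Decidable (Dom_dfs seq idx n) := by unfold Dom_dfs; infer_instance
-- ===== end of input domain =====

-- B rewrites A's recursive backtracking as an iterative loop over an explicit stack of
-- pending (sequence, counter) nodes (same search order, same cost; objective: alternative).

-- ===== PORT A =====
-- A's first for-loop ("for i in range(1, idx//2+1): if seq[-2*i:-i] == seq[-i:]: return ''")
-- as a first-match countdown recursion generating i = 1, 2, … lazily, exactly as Python's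
-- range object yields them (true = the early return of ''); the fuel is the range's length:
def pvCheckLoopA (seq : List Int) : Nat → Int → Bool
  | 0, _ => false
  | f + 1, i =>
    if PySem.List.slice seq (some (-(2 * i))) (some (-i)) == PySem.List.slice seq (some (-i)) none
    then true
    else pvCheckLoopA seq f (i + 1)

def pvCheckA (seq : List Int) (idx : Int) : Bool :=
  pvCheckLoopA seq (PySem.Int.floordiv idx 2).toNat 1

-- ''.join(map(str, seq))
def pvJoin (s : List Int) : String := PySem.Str.join "" (s.map PySem.Int.toStr)

-- A's recursion, with fuel (n - idx).toNat: each recursive call is dfs(seq + [i], idx + 1, n),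
-- so the fuel is exactly the remaining depth; fuel 0 with idx < n is Python's unbounded
-- recursion (outside Pre_). Python's falsy results None and '' are both ported as "".
def pvDfsA (fuel : Nat) (seq : List Int) (idx : Int) (n : Int) : String :=
  if pvCheckA seq idx then ""
  else if idx == n then pvJoin seq
  else
    match fuel with
    | 0 => ""
    | f + 1 =>
      -- 'for i in range(1, 4): res = dfs(seq + [i], idx + 1, n); if res: return res'
      let r1 := pvDfsA f (seq ++ [1]) (idx + 1) n
      if r1 ≠ "" then r1
      else
        let r2 := pvDfsA f (seq ++ [2]) (idx + 1) n
        if r2 ≠ "" then r2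
        else
          let r3 := pvDfsA f (seq ++ [3]) (idx + 1) n
          if r3 ≠ "" then r3 else ""

def dfs (seq : List Int) (idx : Int) (n : Int) : String :=
  pvDfsA (n - idx).toNat seq idx n

-- ===== PORT B =====
-- B's suffix check: 'any(s[-2*j:-j] == s[-j:] for j in range(1, i//2+1))' — an 'any' over the
-- lazily generated j = 1, 2, …, ported as an ||-fold countdown (any short-circuits in Python):
def pvAnyB (s : List Int) : Nat → Int → Bool
  | 0, _ => false
  | f + 1, j =>
    (PySem.List.slice s (some (-(2 * j))) (some (-j)) == PySem.List.slice s (some (-j)) none) ||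
      pvAnyB s f (j + 1)

def pvBadB (s : List Int) (i : Int) : Bool :=
  pvAnyB s (PySem.Int.floordiv i 2).toNat 1

-- B's 'while stack' loop; the Lean list head is the Python list's END (the pop side), so the
-- three appends 3,2,1 become the three conses 1,2,3. The fuel bounds the number of loop
-- iterations (3^(gap+1) suffices, see pvW_le below); it never runs out inside Pre_.
def pvLoopB (fuel : Nat) (n : Int) (stack : List (List Int × Int)) : String :=
  match fuel, stack with
  | _, [] => ""
  | 0, _ :: _ => ""
  | f + 1, (s, i) :: rest =>
    if pvBadB s i then pvLoopB f n rest
    else if i == n then pvJoin s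
    else pvLoopB f n ((s ++ [1], i + 1) :: (s ++ [2], i + 1) :: (s ++ [3], i + 1) :: rest)

def dfs_alt (seq : List Int) (idx : Int) (n : Int) : String :=
  pvLoopB (3 ^ ((n - idx).toNat + 1)) n [(seq, idx)]

-- ===== PRECONDITION & SPEC =====
-- 'seq already ends in a repeated adjacent block of half-length ≤ idx//2': A's first check
-- fires and it returns '' with no recursion at all. The existential bound is capped at
-- seq.length because for i > len(seq) the two Python slices can only agree when seq is empty
-- (the separate first disjunct); this makes the condition cheap to decide for any idx.
def pvRootBad (seq : List Int) (idx : Int) : Prop :=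
  (seq = [] ∧ 2 ≤ idx) ∨
  ∃ i ∈ Finset.Icc 1 (min (PySem.Int.floordiv idx 2).toNat seq.length),
    PySem.List.slice seq (some (-(2 * (i : Int)))) (some (-(i : Int))) =
      PySem.List.slice seq (some (-(i : Int))) none

-- The elements of seq that immediately recreate a repeated adjacent block when appended
-- (appending c gives a square of half-length i iff the last 2*i-1 elements read w·c·w):
def pvImmediateKills (seq : List Int) (idx : Int) : List Int :=
  ((List.range ((seq.length + 1) / 2)).map (· + 1)).filterMap (fun (i : Nat) =>
    if ((i : Int) ≤ PySem.Int.floordiv (idx + 1) 2) ∧ 2 * i - 1 ≤ seq.length ∧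
        (seq.drop (seq.length - (2 * i - 1))).take (i - 1) = seq.drop (seq.length - (i - 1))
    then some (seq.getD (seq.length - i) 0) else none)

-- Pre_ admits every input on which A returns a string: all inputs where A's first check fires
-- (pvRootBad: A returns '' immediately, any idx, n), and all searches with idx ≤ n of depth
-- n - idx ≤ 995 whose candidate set is not immediately exhausted. It excludes only inputs on
-- which A does not return a str: exhausted searches where every candidate next element 1,2,3
-- immediately recreates a repeated block, so A falls off the recursion returning None (B
-- returns ''); root-good searches with idx > n, where completion is impossible and A likewise
-- exhausts to None or overflows the stack (RecursionError); and root-good completions needing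
-- recursion depth n - idx > 995, on which CPython's default 1000-frame stack overflows and A
-- raises RecursionError before it can return.
def Pre_dfs (seq : List Int) (idx : Int) (n : Int) : Prop :=
  pvRootBad seq idx ∨
    (idx ≤ n ∧ (idx = n ∨
      (n - idx ≤ 995 ∧
       ¬((1 : Int) ∈ pvImmediateKills seq idx ∧ (2 : Int) ∈ pvImmediateKills seq idx ∧
         (3 : Int) ∈ pvImmediateKills seq idx))))

instance (seq : List Int) (idx : Int) (n : Int) : Decidable (Pre_dfs seq idx n) := by
  unfold Pre_dfs pvRootBad; infer_instance

def pvWitness_dfs : List Int × Int × Int := ([1, 2, 3], 3, 5)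

def Spec_dfs (seq : List Int) (idx : Int) (n : Int) (out : String) : Prop := out = dfs_alt seq idx n
instance (seq : List Int) (idx : Int) (n : Int) (out : String) : Decidable (Spec_dfs seq idx n out) := by unfold Spec_dfs; infer_instance

-- ===== CLAIM (what is proved, stated in full; the proofs are below) =====
def Claim_equal_dfs : Prop := ∀ (seq : List Int) (idx : Int) (n : Int), Dom_dfs seq idx n → Pre_dfs seq idx n → Spec_dfs seq idx n (dfs seq idx n)

-- ===== LEMMAS AND PROOFS =====

-- A's early-return check loop is B's short-circuit 'any' over the same indices.
theorem pvCheckLoopA_eq_anyB (seq : List Int) (f : Nat) :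
    ∀ i : Int, pvCheckLoopA seq f i = pvAnyB seq f i := by
  induction f with
  | zero => intro i; rfl
  | succ f ih =>
    intro i
    simp only [pvCheckLoopA, pvAnyB]
    split_ifs with h <;> simp [h, ih]

theorem pvCheckA_eq_bad (seq : List Int) (idx : Int) : pvCheckA seq idx = pvBadB seq idx := by
  rw [pvCheckA, pvCheckLoopA_eq_anyB]; rfl

-- pvAnyB over the fuel f starting at j is an 'any' over range(j, j+f).
theorem pvAnyB_eq_any (s : List Int) (f : Nat) :
    ∀ j : Int, pvAnyB s f j =
      (PySem.List.pyRange j (j + f) 1).any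
        (fun k => PySem.List.slice s (some (-(2 * k))) (some (-k)) == PySem.List.slice s (some (-k)) none) := by
  induction f with
  | zero =>
    intro j
    simp [pvAnyB]
  | succ f ih =>
    intro j
    rw [PySem.List.pyRange_one_cons (by push_cast; omega : j < j + ((f + 1 : Nat) : Int))]
    have harg : j + ((f + 1 : Nat) : Int) = (j + 1) + (f : Nat) := by push_cast; ring
    simp only [pvAnyB, List.any_cons, harg, ih (j + 1)]

-- every slice of [] is empty (slices only contain members of the list)
theorem pvSlice_nil (a b : Option Int) : PySem.List.slice ([] : List Int) a b = [] := by
  cases h : PySem.List.slice ([] : List Int) a b with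
  | nil => rfl
  | cons x xs =>
    have hx : x ∈ PySem.List.slice ([] : List Int) a b := by
      rw [h]; exact List.mem_cons_self
    have := PySem.List.mem_of_mem_slice _ a b hx
    simp at this

-- pvRootBad makes the suffix check fire.
theorem pvRootBad_bad (seq : List Int) (idx : Int) (h : pvRootBad seq idx) :
    pvBadB seq idx = true := by
  unfold pvBadB
  rw [pvAnyB_eq_any, List.any_eq_true]
  rcases h with ⟨rfl, h2⟩ | ⟨i, hi, heq⟩
  · refine ⟨1, ?_, ?_⟩
    · rw [PySem.List.mem_pyRange_one,
        PySem.Int.floordiv_eq_ediv_of_pos (by omega : (0:Int) < 2)]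
      omega
    · simp [pvSlice_nil]
  · simp only [Finset.mem_Icc] at hi
    refine ⟨(i : Int), ?_, by simpa using heq⟩
    rw [PySem.List.mem_pyRange_one] at *
    rw [PySem.Int.floordiv_eq_ediv_of_pos (by omega : (0:Int) < 2)] at *
    omega

theorem pvTdc_ne_nil (f n : Nat) (l : List Char) : Nat.toDigitsCore 10 (f + 1) n l ≠ [] := by
  induction f generalizing n l with
  | zero => simp only [Nat.toDigitsCore]; split <;> simp
  | succ f ih =>
    simp only [Nat.toDigitsCore]
    split
    · simp
    · exact ih _ _

theorem pvToChars_ne_nil (x : Int) : PySem.Int.toChars x ≠ [] := by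
  unfold PySem.Int.toChars Nat.toDigits
  split
  · simp
  · exact pvTdc_ne_nil _ _ _

theorem pvJoin_ne_empty (x : Int) (xs : List Int) : pvJoin (x :: xs) ≠ "" := by
  intro h
  have h' := congrArg String.toList h
  simp only [pvJoin, PySem.Str.toList_join, List.map_cons, PySem.Int.toList_toStr] at h'
  cases xs with
  | nil =>
    simp only [List.map_nil, PySem.Chars.join_singleton] at h'
    exact pvToChars_ne_nil x h'
  | cons y ys =>
    rw [List.map_cons, List.map_cons, PySem.Chars.join_cons_cons] at h'
    have hl := congrArg List.length h'
    simp only [List.length_append] at hl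
    exact pvToChars_ne_nil x (List.eq_nil_of_length_eq_zero (by omega))

-- unfolding lemmas for A's recursion at a node
theorem pvDfsA_bad (f : Nat) (s : List Int) (i n : Int) (hb : pvBadB s i = true) :
    pvDfsA f s i n = "" := by
  cases f <;> simp [pvDfsA, pvCheckA_eq_bad, hb]

theorem pvDfsA_ret (f : Nat) (s : List Int) (i n : Int) (hb : pvBadB s i = false) (hi : i = n) :
    pvDfsA f s i n = pvJoin s := by
  subst hi; cases f <;> simp [pvDfsA, pvCheckA_eq_bad, hb]

theorem pvDfsA_step (f : Nat) (s : List Int) (i n : Int) (hb : pvBadB s i = false) (hi : ¬i = n) :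
    pvDfsA (f + 1) s i n =
      (if pvDfsA f (s ++ [1]) (i + 1) n ≠ "" then pvDfsA f (s ++ [1]) (i + 1) n
       else if pvDfsA f (s ++ [2]) (i + 1) n ≠ "" then pvDfsA f (s ++ [2]) (i + 1) n
       else if pvDfsA f (s ++ [3]) (i + 1) n ≠ "" then pvDfsA f (s ++ [3]) (i + 1) n
       else "") := by
  simp [pvDfsA, pvCheckA_eq_bad, hb, hi]

theorem pvLoopB_nil (f : Nat) (n : Int) : pvLoopB f n [] = "" := by cases f <;> rfl

-- the loop-iteration cost of the search below a node with remaining depth g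
def pvW : Nat → Nat
  | 0 => 1
  | g + 1 => 1 + 3 * pvW g

theorem pvW_pos (g : Nat) : 0 < pvW g := by
  cases g with
  | zero => simp [pvW]
  | succ g => simp only [pvW]; omega

theorem pvW_le (g : Nat) : pvW g < 3 ^ (g + 1) := by
  induction g with
  | zero => simp [pvW]
  | succ g ih => simp only [pvW, pow_succ]; omega

def pvCost (n : Int) (stack : List (List Int × Int)) : Nat :=
  (stack.map (fun p => pvW ((n - p.2).toNat))).sum

theorem pvCost_cons (n : Int) (s : List Int) (i : Int) (rest : List (List Int × Int)) :
    pvCost n ((s, i) :: rest) = pvW ((n - i).toNat) + pvCost n rest := by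
  simp [pvCost]

-- first non-empty result in a list of results ('' = failure, as in Python's truthiness)
def pvFirst : List String → String
  | [] => ""
  | x :: l => if x = "" then pvFirst l else x

theorem pvFirst_singleton (a : String) : pvFirst [a] = a := by
  simp only [pvFirst]
  split_ifs with h
  · exact h.symm
  · rfl

theorem pvFirst_cons_ifs (a b c : String) (l : List String) :
    pvFirst ((if a ≠ "" then a else if b ≠ "" then b else if c ≠ "" then c else "") :: l) =
      pvFirst (a :: b :: c :: l) := by
  by_cases ha : a = "" <;> by_cases hb : b = "" <;> by_cases hc : c = "" <;>
    simp [pvFirst, ha, hb, hc]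

-- B's stack loop returns the first non-empty A-result among the pending nodes.
theorem pvLoopB_eq_first (n : Int) (f : Nat) :
    ∀ (stack : List (List Int × Int)),
      pvCost n stack ≤ f →
      (∀ p ∈ stack, p.1 ≠ [] ∧ p.2 ≤ n) →
      pvLoopB f n stack = pvFirst (stack.map (fun p => pvDfsA ((n - p.2).toNat) p.1 p.2 n)) := by
  induction f using Nat.strong_induction_on with
  | _ f ih =>
    intro stack hcost hinv
    match stack with
    | [] => simp [pvLoopB_nil, pvFirst]
    | (s, i) :: rest =>
      rw [pvCost_cons] at hcost
      have hwp := pvW_pos ((n - i).toNat)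
      obtain ⟨f', rfl⟩ : ∃ f', f = f' + 1 := by
        cases f with
        | zero => omega
        | succ f => exact ⟨f, rfl⟩
      obtain ⟨hne, hin⟩ := hinv (s, i) (by simp)
      have hrest : ∀ p ∈ rest, p.1 ≠ [] ∧ p.2 ≤ n :=
        fun p hp => hinv p (List.mem_cons_of_mem _ hp)
      cases hb : pvBadB s i with
      | true =>
        have hstep : pvLoopB (f' + 1) n ((s, i) :: rest) = pvLoopB f' n rest := by
          simp [pvLoopB, hb]
        rw [hstep, List.map_cons, pvDfsA_bad _ s i n hb,
          ih f' (by omega) rest (by omega) hrest]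
        simp [pvFirst]
      | false =>
        by_cases hi : i = n
        · subst hi
          have hstep : pvLoopB (f' + 1) i ((s, i) :: rest) = pvJoin s := by
            simp [pvLoopB, hb]
          rw [hstep, List.map_cons, pvDfsA_ret _ s i i hb rfl]
          obtain ⟨a, as, rfl⟩ := List.exists_cons_of_ne_nil hne
          simp [pvFirst, pvJoin_ne_empty a as]
        · have hlt : i < n := lt_of_le_of_ne hin hi
          have hg : (n - i).toNat = (n - (i + 1)).toNat + 1 := by omega
          have hstep : pvLoopB (f' + 1) n ((s, i) :: rest) =
              pvLoopB f' n ((s ++ [1], i + 1) :: (s ++ [2], i + 1) :: (s ++ [3], i + 1) :: rest) := by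
            simp [pvLoopB, hb, hi]
          have hinv' : ∀ p ∈ (s ++ [1], i + 1) :: (s ++ [2], i + 1) :: (s ++ [3], i + 1) :: rest,
              p.1 ≠ [] ∧ p.2 ≤ n := by
            intro p hp
            simp only [List.mem_cons] at hp
            rcases hp with rfl | rfl | rfl | hp
            · exact ⟨by simp, by omega⟩
            · exact ⟨by simp, by omega⟩
            · exact ⟨by simp, by omega⟩
            · exact hrest p hp
          have hcost' : pvCost n ((s ++ [1], i + 1) :: (s ++ [2], i + 1) :: (s ++ [3], i + 1) :: rest) ≤ f' := by
            rw [pvCost_cons, pvCost_cons, pvCost_cons]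
            rw [hg] at hcost
            simp only [pvW] at hcost
            omega
          rw [hstep, ih f' (by omega) _ hcost' hinv']
          rw [List.map_cons, List.map_cons, List.map_cons, List.map_cons, hg,
            pvDfsA_step _ s i n hb hi]
          exact (pvFirst_cons_ifs _ _ _ _).symm

theorem dfs_eq_alt (seq : List Int) (idx : Int) (n : Int) (h : idx ≤ n) :
    dfs seq idx n = dfs_alt seq idx n := by
  unfold dfs dfs_alt
  cases seq with
  | cons a as =>
    rw [pvLoopB_eq_first n _ [(a :: as, idx)]
      (by simpa [pvCost] using (pvW_le ((n - idx).toNat)).le)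
      (by intro p hp
          simp only [List.mem_cons, List.not_mem_nil, or_false] at hp
          subst hp
          exact ⟨by simp, h⟩)]
    simp only [List.map_cons, List.map_nil, pvFirst_singleton]
  | nil =>
    obtain ⟨f', hf⟩ : ∃ f', 3 ^ ((n - idx).toNat + 1) = f' + 1 :=
      ⟨3 ^ ((n - idx).toNat + 1) - 1, by
        have h3 : 0 < 3 ^ ((n - idx).toNat + 1) := pow_pos (by norm_num) _
        omega⟩
    rw [hf]
    cases hb : pvBadB [] idx with
    | true =>
      rw [pvDfsA_bad _ _ _ _ hb]
      simp [pvLoopB, hb, pvLoopB_nil]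
    | false =>
      by_cases hi : idx = n
      · subst hi
        rw [pvDfsA_ret _ _ _ _ hb rfl]
        simp [pvLoopB, hb]
      · have hlt : idx < n := lt_of_le_of_ne h hi
        have hg : (n - idx).toNat = (n - (idx + 1)).toNat + 1 := by omega
        have hstep : pvLoopB (f' + 1) n [([], idx)] =
            pvLoopB f' n [([] ++ [1], idx + 1), ([] ++ [2], idx + 1), ([] ++ [3], idx + 1)] := by
          simp [pvLoopB, hb, hi]
        have hcost' : pvCost n [(([] : List Int) ++ [1], idx + 1), ([] ++ [2], idx + 1), ([] ++ [3], idx + 1)] ≤ f' := by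
          have hw := pvW_le ((n - (idx + 1)).toNat)
          have h3 : 3 * pvW ((n - (idx + 1)).toNat) < 3 ^ ((n - (idx + 1)).toNat + 2) := by
            calc 3 * pvW ((n - (idx + 1)).toNat) < 3 * 3 ^ ((n - (idx + 1)).toNat + 1) := by omega
              _ = 3 ^ ((n - (idx + 1)).toNat + 2) := by rw [pow_succ]; ring
          have hfe : f' + 1 = 3 ^ ((n - (idx + 1)).toNat + 2) := by rw [← hf, hg]
          simp only [pvCost, List.map_cons, List.map_nil, List.sum_cons, List.sum_nil]
          omega
        rw [hstep, pvLoopB_eq_first n f' _ hcost'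
          (by intro p hp
              simp only [List.mem_cons, List.not_mem_nil, or_false] at hp
              rcases hp with rfl | rfl | rfl <;> exact ⟨by simp, by omega⟩)]
        rw [hg, pvDfsA_step _ _ _ _ hb hi]
        simp only [List.map_cons, List.map_nil]
        rw [← pvFirst_cons_ifs, pvFirst_singleton]

-- when the root check fires, both programs return '' regardless of idx vs n
theorem dfs_eq_alt_of_rootBad (seq : List Int) (idx : Int) (n : Int) (h : pvRootBad seq idx) :
    dfs seq idx n = dfs_alt seq idx n := by
  have hb := pvRootBad_bad seq idx h
  unfold dfs dfs_alt
  rw [pvDfsA_bad _ _ _ _ hb]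
  obtain ⟨f', hf⟩ : ∃ f', 3 ^ ((n - idx).toNat + 1) = f' + 1 :=
    ⟨3 ^ ((n - idx).toNat + 1) - 1, by
      have h3 : 0 < 3 ^ ((n - idx).toNat + 1) := pow_pos (by norm_num) _
      omega⟩
  rw [hf]
  simp [pvLoopB, hb, pvLoopB_nil]

-- ===== VERDICT (by name: the statement is the Claim_ definition above) =====
theorem dfs_spec : Claim_equal_dfs := by
  intro seq idx n _ hpre
  unfold Spec_dfs
  rcases hpre with hbad | ⟨hle, _⟩
  · exact dfs_eq_alt_of_rootBad seq idx n hbad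
  · exact dfs_eq_alt seq idx n hle
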